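-- pv_equiv track=rewrite | github.com/synqratech/omega-walls | omega/projector/pi0_intent_v2.py | _near_negation_with_markers
-- ===== SOURCE A (Python) =====
-- from typing import Any, Dict, Iterable, List, Mapping, Sequence, Tuple
--
-- def _near_negation_with_markers(
--     tokens: Sequence[str],
--     target_vocab: Iterable[str],
--     window: int,
--     neg_markers: Sequence[str],
-- ) -> bool:
--     target_vocab_set = set(target_vocab)
--     target_positions = [i for i, tok in enumerate(tokens) if tok in target_vocab_set]
--     if not target_positions:
--         return False
--
--     def marker_in_window(window_tokens: Sequence[str], marker: str) -> bool:
--         marker_tokens = marker.split()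
--         if not marker_tokens:
--             return False
--         if len(marker_tokens) == 1:
--             return marker_tokens[0] in window_tokens
--         for i in range(0, max(0, len(window_tokens) - len(marker_tokens) + 1)):
--             if list(window_tokens[i : i + len(marker_tokens)]) == marker_tokens:
--                 return True
--         return False
--
--     for idx in target_positions:
--         left = max(0, idx - window)
--         right = min(len(tokens), idx + window + 1)
--         span_tokens = tokens[left:right]
--         for marker in neg_markers:
--             if marker_in_window(span_tokens, marker):
--                 return True
--     return False
-- ===== SOURCE B (Python) =====
-- def _near_negation_with_markers(tokens, target_vocab, window, neg_markers):
--     tv = set(target_vocab)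
--     n = len(tokens)
--     pref = [0]
--     for t in tokens:
--         pref.append(pref[-1] + (t in tv))
--     if pref[-1] == 0:
--         return False
--     for marker in neg_markers:
--         mt = marker.split()
--         L = len(mt)
--         if L == 0:
--             continue
--         for s in range(n - L + 1):
--             if list(tokens[s:s + L]) == mt:
--                 # target positions whose window covers this occurrence
--                 lo = max(0, s + L - 1 - window)
--                 hi = min(n, s + window + 1)
--                 if lo < hi and pref[hi] > pref[lo]:
--                     return True
--     return False
-- ===== Notes on version B (the rewrite author's own statement) =====
-- stated objective: alternative
-- what changed: Instead of re-scanning every marker over a freshly sliced window for each target position (targets x markers x window x marker-length), B builds a prefix-count array of target positions once and scans the token list once per marker for marker occurrences, answering 'does some target's window cover this occurrence' as one O(1) interval query on the prefix counts.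
-- intended difference: When window <= -2 and a target index k has k+window+1 < 0, A's slice stop is a negative Python index that wraps to the end of the list, so A scans the accidental span tokens[k-window : n+k+window+1] and can return True; B treats such a negative window as covering no tokens and returns False there, which is the intended reading of a context window. — e.g. on _near_negation_with_markers(["t", "a", "not", "b"], ["t"], -2, ["not"]): A returns true, B returns false
import Mathlib
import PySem

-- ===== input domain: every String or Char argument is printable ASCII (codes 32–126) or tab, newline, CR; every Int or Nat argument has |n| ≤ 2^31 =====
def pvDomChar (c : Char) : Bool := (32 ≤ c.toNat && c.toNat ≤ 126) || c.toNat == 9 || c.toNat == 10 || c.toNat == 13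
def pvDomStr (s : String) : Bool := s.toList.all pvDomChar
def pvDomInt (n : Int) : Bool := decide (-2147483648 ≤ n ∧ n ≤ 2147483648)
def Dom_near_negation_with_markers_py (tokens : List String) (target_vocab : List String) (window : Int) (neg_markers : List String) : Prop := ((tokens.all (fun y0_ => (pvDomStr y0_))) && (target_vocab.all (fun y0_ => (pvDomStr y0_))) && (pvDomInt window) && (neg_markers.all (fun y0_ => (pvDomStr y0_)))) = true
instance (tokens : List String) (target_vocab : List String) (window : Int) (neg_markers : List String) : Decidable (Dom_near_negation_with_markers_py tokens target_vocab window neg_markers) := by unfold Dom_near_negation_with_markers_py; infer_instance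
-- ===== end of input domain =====

-- B replaces A's per-target window re-scan by one prefix-count array of target positions plus a single
-- occurrence scan per marker (objective: alternative); on window ≤ -2 with a wrapped slice A and B
-- intentionally differ (see D_ below).

-- ===== PORT A =====
-- Python's inner helper marker_in_window (closure over nothing but its arguments)
def pvMarkerInWindow (window_tokens : List String) (marker : String) : Bool :=
  let marker_tokens := PySem.Str.split₀ marker
  if marker_tokens = [] then false
  else if marker_tokens.length = 1 then window_tokens.contains marker_tokens[0]!
  else (PySem.List.pyRange 0 (max 0 ((window_tokens.length : Int) - marker_tokens.length + 1)) 1).any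
    (fun i => PySem.List.slice window_tokens (some i) (some (i + marker_tokens.length)) == marker_tokens)

def near_negation_with_markers_py (tokens : List String) (target_vocab : List String) (window : Int) (neg_markers : List String) : Bool :=
  let target_vocab_set := PySem.Set.ofList target_vocab
  let target_positions := ((PySem.List.enumerate tokens).filter
      (fun p => PySem.Set.contains target_vocab_set p.2)).map Prod.fst
  if target_positions = [] then false
  else target_positions.any (fun idx =>
    let left := max 0 (idx - window)
    let right := min (tokens.length : Int) (idx + window + 1)
    let span_tokens := PySem.List.slice tokens (some left) (some right)
    neg_markers.any (fun marker => pvMarkerInWindow span_tokens marker))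

-- ===== PORT B =====
def near_negation_with_markers_py_alt (tokens : List String) (target_vocab : List String) (window : Int) (neg_markers : List String) : Bool :=
  let tv := PySem.Set.ofList target_vocab
  let n := tokens.length
  let pref := tokens.foldl (fun (acc : List Nat) t =>
      acc ++ [acc.getLast! + (if PySem.Set.contains tv t then 1 else 0)]) [0]
  if pref.getLast! = 0 then false
  else neg_markers.any (fun marker =>
    let mt := PySem.Str.split₀ marker
    let L := mt.length
    if L = 0 then false
    else (List.range (n + 1 - L)).any (fun s =>
      -- Source B's tokens[s:s+L] has 0 ≤ s and s+L within clamp range, where Python's slice is exactly drop/take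
      if (tokens.drop s).take L == mt then
        let lo := max 0 ((s : Int) + L - 1 - window)
        let hi := min (n : Int) ((s : Int) + window + 1)
        decide (lo < hi) && decide (pref.getD lo.toNat 0 < pref.getD hi.toNat 0)
      else false))

-- ===== PRECONDITION & SPEC =====

-- When window ≤ -2 and a target index k has k+window+1 < 0, A's slice stop is a negative Python
-- index that wraps to the end of the list, so A scans the accidental span
-- tokens[k-window : n+k+window+1] and can return True; B treats such a negative window as covering
-- no tokens and returns False there, which is the intended reading of a context window.
-- D_ says: some whitespace-split negation marker occurs (as a consecutive run, starting at s) inside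
-- that accidental span of some target position k.  (A genuine-window match needs
-- marker-length ≤ 2*window+1, impossible here, so no further conjunct is needed.)
def D_near_negation_with_markers_py (tokens : List String) (target_vocab : List String) (window : Int) (neg_markers : List String) : Prop :=
  window ≤ -2 ∧ ∃ m ∈ neg_markers, PySem.Str.split₀ m ≠ [] ∧
    ∃ s < tokens.length, PySem.Str.split₀ m <+: tokens.drop s ∧
      ∃ k < tokens.length, tokens[k]! ∈ target_vocab ∧
        (k : Int) - window ≤ s ∧ (k : Int) + window + 1 < 0 ∧
        s + (PySem.Str.split₀ m).length ≤ tokens.length + (k : Int) + window + 1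
instance (tokens : List String) (target_vocab : List String) (window : Int) (neg_markers : List String) : Decidable (D_near_negation_with_markers_py tokens target_vocab window neg_markers) := by unfold D_near_negation_with_markers_py; infer_instance

def Spec_near_negation_with_markers_py (tokens : List String) (target_vocab : List String) (window : Int) (neg_markers : List String) (out : Bool) : Prop := ¬ D_near_negation_with_markers_py tokens target_vocab window neg_markers → out = near_negation_with_markers_py_alt tokens target_vocab window neg_markers
instance (tokens : List String) (target_vocab : List String) (window : Int) (neg_markers : List String) (out : Bool) : Decidable (Spec_near_negation_with_markers_py tokens target_vocab window neg_markers out) := by unfold Spec_near_negation_with_markers_py; infer_instance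

def pvDiffWitness_near_negation_with_markers_py : List String × List String × Int × List String :=
  (["t", "a", "not", "b"], ["t"], -2, ["not"])
def pvDiffWitnessOut_near_negation_with_markers_py : Bool × Bool := (true, false)

-- ===== CLAIM (what is proved, stated in full; the proofs are below) =====
def Claim_unchanged_near_negation_with_markers_py : Prop := ∀ (tokens : List String) (target_vocab : List String) (window : Int) (neg_markers : List String), Dom_near_negation_with_markers_py tokens target_vocab window neg_markers → Spec_near_negation_with_markers_py tokens target_vocab window neg_markers (near_negation_with_markers_py tokens target_vocab window neg_markers)
def Claim_changed_near_negation_with_markers_py : Prop := Dom_near_negation_with_markers_py (pvDiffWitness_near_negation_with_markers_py.1) (pvDiffWitness_near_negation_with_markers_py.2.1) (pvDiffWitness_near_negation_with_markers_py.2.2.1) (pvDiffWitness_near_negation_with_markers_py.2.2.2) ∧ D_near_negation_with_markers_py (pvDiffWitness_near_negation_with_markers_py.1) (pvDiffWitness_near_negation_with_markers_py.2.1) (pvDiffWitness_near_negation_with_markers_py.2.2.1) (pvDiffWitness_near_negation_with_markers_py.2.2.2) ∧ near_negation_with_markers_py (pvDiffWitness_near_negation_with_markers_py.1) (pvDiffWitness_near_negation_with_markers_py.2.1)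 (pvDiffWitness_near_negation_with_markers_py.2.2.1) (pvDiffWitness_near_negation_with_markers_py.2.2.2) = pvDiffWitnessOut_near_negation_with_markers_py.1 ∧ near_negation_with_markers_py_alt (pvDiffWitness_near_negation_with_markers_py.1) (pvDiffWitness_near_negation_with_markers_py.2.1) (pvDiffWitness_near_negation_with_markers_py.2.2.1) (pvDiffWitness_near_negation_with_markers_py.2.2.2) = pvDiffWitnessOut_near_negation_with_markers_py.2 ∧ pvDiffWitnessOut_near_negation_with_markers_py.1 ≠ pvDiffWitnessOut_near_negation_with_markers_py.2
def Claim_exact_near_negation_with_markers_py : Prop := ∀ (tokens : List String) (target_vocab : List String) (window : Int) (neg_markers : List String), Dom_near_negation_with_markers_py tokens target_vocab window neg_markers → D_near_negation_with_markers_py tokens target_vocab window neg_markers → near_negation_with_markers_py tokens target_vocab window neg_markers ≠ near_negation_with_markers_py_alt tokens target_vocab window neg_markers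

-- ===== LEMMAS AND PROOFS =====

-- the take/drop form of an occurrence, used throughout the proofs
def pvOccT (tokens mt : List String) (s : Nat) : Prop := (tokens.drop s).take mt.length = mt

-- the two ways A's per-target slice can contain a marker occurrence: the genuine window, and the
-- wrapped span when the slice stop k+window+1 is negative
def pvPNorm (tokens target_vocab : List String) (window : Int) (neg_markers : List String) : Prop :=
  ∃ m ∈ neg_markers, PySem.Str.split₀ m ≠ [] ∧
    ∃ s : Nat, pvOccT tokens (PySem.Str.split₀ m) s ∧
      ∃ k < tokens.length, tokens[k]! ∈ target_vocab ∧
        (k : Int) - window ≤ (s : Int) ∧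
        (s : Int) + ((PySem.Str.split₀ m).length : Int) ≤ (k : Int) + window + 1

def pvPWrap (tokens target_vocab : List String) (window : Int) (neg_markers : List String) : Prop :=
  ∃ m ∈ neg_markers, PySem.Str.split₀ m ≠ [] ∧
    ∃ s : Nat, pvOccT tokens (PySem.Str.split₀ m) s ∧
      ∃ k < tokens.length, tokens[k]! ∈ target_vocab ∧
        (k : Int) - window ≤ (s : Int) ∧
        (k : Int) + window + 1 < 0 ∧
        (s : Int) + ((PySem.Str.split₀ m).length : Int) ≤ (tokens.length : Int) + (k : Int) + window + 1

lemma pvOccT_le {tokens mt : List String} {s : Nat} (hne : mt ≠ []) (h : pvOccT tokens mt s) :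
    s + mt.length ≤ tokens.length := by
  have h0 : 0 < mt.length := List.length_pos_iff.mpr hne
  have hl := congrArg List.length h
  simp [List.length_take, List.length_drop] at hl
  omega

lemma pvOccT_prefix (tokens mt : List String) (s : Nat) :
    mt <+: tokens.drop s ↔ pvOccT tokens mt s := by
  rw [List.prefix_iff_eq_take]
  unfold pvOccT
  exact eq_comm

lemma pvD_iff (tokens target_vocab : List String) (window : Int) (neg_markers : List String) :
    D_near_negation_with_markers_py tokens target_vocab window neg_markers ↔
      (pvPWrap tokens target_vocab window neg_markers ∧ ¬ pvPNorm tokens target_vocab window neg_markers) := by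
  unfold D_near_negation_with_markers_py pvPWrap pvPNorm
  constructor
  · rintro ⟨hw, m, hm, hne, s, hs, hpre, k, hk, hmem, h1, h2, h3⟩
    have hocc := (pvOccT_prefix tokens _ s).mp hpre
    refine ⟨⟨m, hm, hne, s, hocc, k, hk, hmem, h1, h2, h3⟩, ?_⟩
    rintro ⟨m', hm', hne', s', hocc', k', hk', hmem', h1', h2'⟩
    have hL' : 0 < (PySem.Str.split₀ m').length := List.length_pos_iff.mpr hne'
    omega
  · rintro ⟨⟨m, hm, hne, s, hocc, k, hk, hmem, h1, h2, h3⟩, -⟩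
    have hL : 0 < (PySem.Str.split₀ m).length := List.length_pos_iff.mpr hne
    have hsl := pvOccT_le hne hocc
    exact ⟨by omega, m, hm, hne, s, by omega, (pvOccT_prefix tokens _ s).mpr hocc, k, hk, hmem, h1, h2, h3⟩

lemma pvSetMem (tv : List String) (x : String) :
    PySem.Set.contains (PySem.Set.ofList tv) x = decide (x ∈ tv) := by
  by_cases h : x ∈ tv <;> simp [PySem.Set.contains, PySem.Set.mem_ofList, h]

lemma pvGetBang {l : List String} {k : Nat} (h : k < l.length) : l[k]! = l[k] := by
  simp [getElem!_def, List.getElem?_eq_getElem h]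

lemma pvOccT_take_drop (tokens mt : List String) (a b j : Nat) (h : j + mt.length ≤ b - a) :
    pvOccT ((tokens.drop a).take (b - a)) mt j ↔ pvOccT tokens mt (a + j) := by
  unfold pvOccT
  rw [List.drop_take, List.drop_drop, List.take_take, min_eq_left (by omega)]

lemma pvMIW_iff (wt : List String) (m : String) :
    pvMarkerInWindow wt m = true ↔
      (PySem.Str.split₀ m ≠ [] ∧ ∃ j : Nat,
        j + (PySem.Str.split₀ m).length ≤ wt.length ∧ pvOccT wt (PySem.Str.split₀ m) j) := by
  unfold pvMarkerInWindow
  set mt := PySem.Str.split₀ m with hmt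
  clear_value mt
  by_cases h0 : mt = []
  · simp [h0]
  have hL : 0 < mt.length := List.length_pos_iff.mpr h0
  by_cases h1 : mt.length = 1
  · obtain ⟨x, hx⟩ := List.length_eq_one_iff.mp h1
    simp only [h0, if_false, h1, if_true]
    rw [List.contains_iff_mem]
    subst hx
    simp only [ne_eq, h0, not_false_iff, true_and]
    constructor
    · intro hmem
      obtain ⟨i, hi, rfl⟩ := List.mem_iff_getElem.mp hmem
      refine ⟨i, by omega, ?_⟩
      unfold pvOccT
      simp [List.take_one_drop_eq_of_lt_length hi]
    · rintro ⟨j, hj, hocc⟩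
      unfold pvOccT at hocc
      simp only [List.length_cons, List.length_nil] at hocc
      rw [List.take_one_drop_eq_of_lt_length (by omega)] at hocc
      simp at hocc
      exact hocc ▸ List.getElem_mem _
  · simp only [h0, if_false, h1, if_false]
    rw [List.any_eq_true]
    simp only [PySem.List.mem_pyRange_one, beq_iff_eq]
    constructor
    · rintro ⟨i, ⟨hi0, hilt⟩, hsl⟩
      have hib : i < (wt.length : Int) - mt.length + 1 := by omega
      refine ⟨h0, i.toNat, by omega, ?_⟩
      have hi' : i = ((i.toNat : Nat) : Int) := by omega
      rw [hi'] at hsl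
      rw [PySem.List.slice_natCast_add] at hsl
      unfold pvOccT
      exact hsl
    · rintro ⟨-, j, hj, hocc⟩
      refine ⟨(j : Int), ⟨by omega, by omega⟩, ?_⟩
      rw [PySem.List.slice_natCast_add]
      exact hocc

lemma pvSpan_iff (tokens mt : List String) (a b : Nat) (hb : b ≤ tokens.length) (hne : mt ≠ []) :
    (∃ j : Nat, j + mt.length ≤ ((tokens.drop a).take (b - a)).length ∧ pvOccT ((tokens.drop a).take (b - a)) mt j)
    ↔ ∃ s : Nat, a ≤ s ∧ s + mt.length ≤ b ∧ pvOccT tokens mt s := by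
  have hlen : ((tokens.drop a).take (b - a)).length = min (b - a) (tokens.length - a) := by simp
  have hL : 0 < mt.length := List.length_pos_iff.mpr hne
  constructor
  · rintro ⟨j, hj, hocc⟩
    rw [hlen] at hj
    rw [pvOccT_take_drop tokens mt a b j (by omega)] at hocc
    exact ⟨a + j, by omega, by omega, hocc⟩
  · rintro ⟨s, has, hsb, hocc⟩
    have hsl := pvOccT_le hne hocc
    refine ⟨s - a, by omega, ?_⟩
    rw [pvOccT_take_drop tokens mt a b (s - a) (by omega)]
    rwa [show a + (s - a) = s by omega]

lemma pvClampIdx_cast (n : Nat) (i : Int) :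
    ((PySem.List.clampIdx n i : Nat) : Int) = max 0 (min (n : Int) (if i < 0 then (n : Int) + i else i)) := by
  simp only [PySem.List.clampIdx]
  split_ifs <;> push_cast <;> omega

lemma pvA_iff (tokens target_vocab : List String) (window : Int) (neg_markers : List String) :
    near_negation_with_markers_py tokens target_vocab window neg_markers = true ↔
      ∃ k : Nat, k < tokens.length ∧ tokens[k]! ∈ target_vocab ∧
        ∃ m ∈ neg_markers, PySem.Str.split₀ m ≠ [] ∧
          ∃ s : Nat,
            PySem.List.clampIdx tokens.length (max 0 ((k : Int) - window)) ≤ s ∧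
            s + (PySem.Str.split₀ m).length ≤ PySem.List.clampIdx tokens.length (min (tokens.length : Int) ((k : Int) + window + 1)) ∧
            pvOccT tokens (PySem.Str.split₀ m) s := by
  have hif : ∀ (tp : List Int) (f : Int → Bool), (if tp = [] then false else tp.any f) = tp.any f := by
    intro tp f; by_cases h : tp = [] <;> simp [h]
  have hslice : ∀ (a b : Int), PySem.List.slice tokens (some a) (some b)
      = (tokens.drop (PySem.List.clampIdx tokens.length a)).take
          (PySem.List.clampIdx tokens.length b - PySem.List.clampIdx tokens.length a) := by
    intro a b; simp [PySem.List.slice]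
  unfold near_negation_with_markers_py
  rw [hif, List.any_eq_true]
  constructor
  · rintro ⟨idx, hmem, hany⟩
    simp only [List.mem_map, List.mem_filter, PySem.List.mem_enumerate_iff] at hmem
    obtain ⟨p, ⟨⟨k, hk, rfl⟩, hq⟩, rfl⟩ := hmem
    simp only [zero_add] at hany ⊢
    rw [List.any_eq_true] at hany
    obtain ⟨m, hm, hmiw⟩ := hany
    rw [hslice] at hmiw
    rw [pvMIW_iff] at hmiw
    obtain ⟨hne, hex⟩ := hmiw
    rw [pvSpan_iff tokens _ _ _ (PySem.List.clampIdx_le _ _) hne] at hex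
    obtain ⟨s, hs1, hs2, hocc⟩ := hex
    refine ⟨k, hk, ?_, m, hm, hne, s, ?_, hs2, hocc⟩
    · rw [pvGetBang hk]
      rw [pvSetMem] at hq
      simpa using hq
    · exact hs1
  · rintro ⟨k, hk, hmem, m, hm, hne, s, hs1, hs2, hocc⟩
    refine ⟨(k : Int), ?_, ?_⟩
    · simp only [List.mem_map, List.mem_filter, PySem.List.mem_enumerate_iff]
      refine ⟨((k : Int), tokens[k]), ⟨⟨k, hk, by simp⟩, ?_⟩, rfl⟩
      rw [pvSetMem]
      rw [pvGetBang hk] at hmem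
      simpa using hmem
    · rw [List.any_eq_true]
      refine ⟨m, hm, ?_⟩
      rw [hslice, pvMIW_iff]
      refine ⟨hne, ?_⟩
      rw [pvSpan_iff tokens _ _ _ (PySem.List.clampIdx_le _ _) hne]
      exact ⟨s, hs1, hs2, hocc⟩

lemma pvA_iff_P (tokens target_vocab : List String) (window : Int) (neg_markers : List String) :
    near_negation_with_markers_py tokens target_vocab window neg_markers = true ↔
      (pvPNorm tokens target_vocab window neg_markers ∨ pvPWrap tokens target_vocab window neg_markers) := by
  rw [pvA_iff]
  unfold pvPNorm pvPWrap
  constructor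
  · rintro ⟨k, hk, hmem, m, hm, hne, s, h1, h2, hocc⟩
    have hL : 0 < (PySem.Str.split₀ m).length := List.length_pos_iff.mpr hne
    have hsl := pvOccT_le hne hocc
    have hc1 := pvClampIdx_cast tokens.length (max 0 ((k : Int) - window))
    have hc2 := pvClampIdx_cast tokens.length (min (tokens.length : Int) ((k : Int) + window + 1))
    by_cases hcase : (k : Int) + window + 1 < 0
    · exact Or.inr ⟨m, hm, hne, s, hocc, k, hk, hmem, by omega, hcase, by omega⟩
    · exact Or.inl ⟨m, hm, hne, s, hocc, k, hk, hmem, by omega, by omega⟩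
  · intro h
    have key : ∃ m ∈ neg_markers, PySem.Str.split₀ m ≠ [] ∧
        ∃ s : Nat, pvOccT tokens (PySem.Str.split₀ m) s ∧
          ∃ k < tokens.length, tokens[k]! ∈ target_vocab ∧
            (k : Int) - window ≤ (s : Int) ∧
            ((s : Int) + ((PySem.Str.split₀ m).length : Int) ≤ (k : Int) + window + 1 ∨
             ((k : Int) + window + 1 < 0 ∧
              (s : Int) + ((PySem.Str.split₀ m).length : Int) ≤ (tokens.length : Int) + (k : Int) + window + 1)) := by
      rcases h with ⟨m, hm, hne, s, hocc, k, hk, hmem, h1, h2⟩ |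
                    ⟨m, hm, hne, s, hocc, k, hk, hmem, h1, h2, h3⟩
      · exact ⟨m, hm, hne, s, hocc, k, hk, hmem, h1, Or.inl h2⟩
      · exact ⟨m, hm, hne, s, hocc, k, hk, hmem, h1, Or.inr ⟨h2, h3⟩⟩
    obtain ⟨m, hm, hne, s, hocc, k, hk, hmem, hle1, hle2⟩ := key
    have hL : 0 < (PySem.Str.split₀ m).length := List.length_pos_iff.mpr hne
    have hsl := pvOccT_le hne hocc
    have hc1 := pvClampIdx_cast tokens.length (max 0 ((k : Int) - window))
    have hc2 := pvClampIdx_cast tokens.length (min (tokens.length : Int) ((k : Int) + window + 1))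
    rcases hle2 with h | ⟨hneg, h⟩
    · exact ⟨k, hk, hmem, m, hm, hne, s, by omega, by omega, hocc⟩
    · exact ⟨k, hk, hmem, m, hm, hne, s, by omega, by omega, hocc⟩

lemma pvLastBang (l : List Nat) (x : Nat) : (l ++ [x]).getLast! = x := by
  rw [List.getLast!_eq_getLast?_getD, List.getLast?_append]
  simp

lemma pvPref (p : String → Bool) (ts done : List String) :
    ts.foldl (fun (acc : List Nat) t => acc ++ [acc.getLast! + (if p t then 1 else 0)])
      ((List.range (done.length + 1)).map (fun k => (done.take k).countP p))
    = (List.range ((done ++ ts).length + 1)).map (fun k => ((done ++ ts).take k).countP p) := by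
  induction ts generalizing done with
  | nil => simp
  | cons t ts ih =>
    rw [List.foldl_cons]
    have hlast : ((List.range (done.length + 1)).map (fun k => (done.take k).countP p)).getLast!
        = done.countP p := by
      rw [List.range_succ, List.map_append]
      simp only [List.map_cons, List.map_nil]
      rw [pvLastBang]
      rw [List.take_of_length_le (le_refl done.length)]
    have hc : done.countP p + (if p t then 1 else 0) = (done ++ [t]).countP p := by
      cases hpt : p t <;> simp [List.countP_append, hpt]
    have hmap : (List.range (done.length + 1)).map (fun k => (done.take k).countP p) ++ [(done ++ [t]).countP p]
        = (List.range ((done ++ [t]).length + 1)).map (fun k => ((done ++ [t]).take k).countP p) := by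
      have h1 : (done ++ [t]).length = done.length + 1 := by simp
      rw [h1]
      conv_rhs => rw [List.range_succ, List.map_append]
      congr 1
      · apply List.map_congr_left
        intro k hk
        rw [List.mem_range] at hk
        rw [List.take_append_of_le_length (by omega)]
      · simp only [List.map_cons, List.map_nil]
        rw [List.take_of_length_le (by simp)]
    rw [hlast, hc, hmap, ih (done ++ [t])]
    simp

lemma pvGetD_map_range (f : Nat → Nat) (N k : Nat) (hk : k < N) :
    (((List.range N).map f).getD k 0) = f k := by
  simp [List.getD_eq_getElem?_getD, List.getElem?_map, List.getElem?_range hk]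

lemma pvCount_lt_iff (tokens : List String) (p : String → Bool) (lo hi : Nat)
    (hhi : hi ≤ tokens.length) :
    ((tokens.take lo).countP p < (tokens.take hi).countP p) ↔
      ∃ k : Nat, lo ≤ k ∧ k < hi ∧ p (tokens[k]!) = true := by
  by_cases hlo : lo ≤ hi
  case neg =>
    constructor
    · intro h
      exfalso
      have hmono : (tokens.take hi).countP p ≤ (tokens.take lo).countP p := by
        have hsub : (tokens.take hi).Sublist (tokens.take lo) := by
          rw [show tokens.take hi = (tokens.take lo).take hi by
            rw [List.take_take, min_eq_left (by omega)]]
          exact List.take_sublist _ _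
        exact hsub.countP_le
      omega
    · rintro ⟨k, h1, h2, _⟩; omega
  case pos =>
  have h1 : tokens.take hi = tokens.take lo ++ (tokens.drop lo).take (hi - lo) := by
    conv_lhs => rw [show hi = lo + (hi - lo) by omega, List.take_add]
  rw [h1, List.countP_append]
  have hmidlen : ((tokens.drop lo).take (hi - lo)).length = min (hi - lo) (tokens.length - lo) := by simp
  constructor
  · intro h
    have hpos : 0 < ((tokens.drop lo).take (hi - lo)).countP p := by omega
    obtain ⟨x, hx, hpx⟩ := List.countP_pos_iff.mp hpos
    obtain ⟨j, hj, rfl⟩ := List.mem_iff_getElem.mp hx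
    have hjlt : j < min (hi - lo) (tokens.length - lo) := by omega
    have hkn : lo + j < tokens.length := by omega
    refine ⟨lo + j, by omega, by omega, ?_⟩
    rw [pvGetBang hkn]
    rw [List.getElem_take, List.getElem_drop] at hpx
    exact hpx
  · rintro ⟨k, h1k, h2k, hpk⟩
    have hkn : k < tokens.length := by omega
    have : 0 < ((tokens.drop lo).take (hi - lo)).countP p := by
      apply List.countP_pos_iff.mpr
      refine ⟨tokens[k], ?_, ?_⟩
      · apply List.mem_iff_getElem.mpr
        refine ⟨k - lo, by rw [hmidlen]; omega, ?_⟩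
        rw [List.getElem_take, List.getElem_drop]
        congr 1
        omega
      · rw [pvGetBang hkn] at hpk
        exact hpk
    omega

lemma pvB_iff (tokens target_vocab : List String) (window : Int) (neg_markers : List String) :
    near_negation_with_markers_py_alt tokens target_vocab window neg_markers = true ↔
      pvPNorm tokens target_vocab window neg_markers := by
  have hp : ∀ x, (PySem.Set.contains (PySem.Set.ofList target_vocab) x = true) ↔ x ∈ target_vocab := by
    intro x; rw [pvSetMem]; exact decide_eq_true_iff
  have hfold := pvPref (fun t => PySem.Set.contains (PySem.Set.ofList target_vocab) t) tokens []
  simp only [List.nil_append, List.length_nil, List.take_nil, List.countP_nil, Nat.zero_add,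
    List.range_one, List.map_cons, List.map_nil] at hfold
  unfold near_negation_with_markers_py_alt
  dsimp only
  rw [hfold]
  set p : String → Bool := fun t => PySem.Set.contains (PySem.Set.ofList target_vocab) t with hpdef
  set n := tokens.length with hn
  have hlast : ((List.range (n + 1)).map (fun k => (tokens.take k).countP p)).getLast!
      = tokens.countP p := by
    rw [List.range_succ, List.map_append]
    simp only [List.map_cons, List.map_nil]
    rw [pvLastBang]
    rw [List.take_of_length_le (le_refl tokens.length)]
  rw [hlast]
  unfold pvPNorm
  by_cases hc : tokens.countP p = 0
  · rw [if_pos hc]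
    simp only [Bool.false_eq_true, false_iff]
    rintro ⟨m, hm, hne, s, hocc, k, hk, hmem, h1, h2⟩
    have : 0 < tokens.countP p := by
      apply List.countP_pos_iff.mpr
      refine ⟨tokens[k], List.getElem_mem hk, ?_⟩
      rw [hp]
      rwa [pvGetBang hk] at hmem
    omega
  · rw [if_neg hc, List.any_eq_true]
    constructor
    · rintro ⟨m, hm, hbody⟩
      by_cases hmt : PySem.Str.split₀ m = []
      · rw [if_pos (by simp [hmt])] at hbody; exact absurd hbody (by simp)
      · have hL : 0 < (PySem.Str.split₀ m).length := List.length_pos_iff.mpr hmt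
        rw [if_neg (by omega), List.any_eq_true] at hbody
        obtain ⟨s, hsr, hg⟩ := hbody
        rw [List.mem_range] at hsr
        by_cases hocc : (tokens.drop s).take (PySem.Str.split₀ m).length = PySem.Str.split₀ m
        case neg =>
          rw [if_neg (by simpa using hocc)] at hg; exact absurd hg (by simp)
        rw [if_pos (by simpa using hocc)] at hg
        rw [Bool.and_eq_true, decide_eq_true_iff, decide_eq_true_iff] at hg
        obtain ⟨hlohi, hcnt⟩ := hg
        set lo := max 0 ((s : Int) + ((PySem.Str.split₀ m).length : Int) - 1 - window) with hlo
        set hi := min ((n : Nat) : Int) ((s : Int) + window + 1) with hhi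
        rw [pvGetD_map_range _ _ _ (by omega), pvGetD_map_range _ _ _ (by omega)] at hcnt
        rw [pvCount_lt_iff tokens p lo.toNat hi.toNat (by omega)] at hcnt
        obtain ⟨k, hk1, hk2, hpk⟩ := hcnt
        refine ⟨m, hm, hmt, s, hocc, k, by omega, ?_, by omega, by omega⟩
        rw [← hp]
        exact hpk
    · rintro ⟨m, hm, hne, s, hocc, k, hk, hmem, h1, h2⟩
      have hL : 0 < (PySem.Str.split₀ m).length := List.length_pos_iff.mpr hne
      have hsl := pvOccT_le hne hocc
      refine ⟨m, hm, ?_⟩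
      rw [if_neg (by omega), List.any_eq_true]
      refine ⟨s, List.mem_range.mpr (by omega), ?_⟩
      rw [if_pos (by simpa using hocc)]
      rw [Bool.and_eq_true, decide_eq_true_iff, decide_eq_true_iff]
      set lo := max 0 ((s : Int) + ((PySem.Str.split₀ m).length : Int) - 1 - window) with hlo
      set hi := min ((n : Nat) : Int) ((s : Int) + window + 1) with hhi
      have hpk : p (tokens[k]!) = true := by
        rw [hp]; exact hmem
      refine ⟨by omega, ?_⟩
      rw [pvGetD_map_range _ _ _ (by omega), pvGetD_map_range _ _ _ (by omega)]
      rw [pvCount_lt_iff tokens p lo.toNat hi.toNat (by omega)]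
      exact ⟨k, by omega, by omega, hpk⟩

-- ===== VERDICT (by name: the statements are the Claim_ definitions above) =====
theorem near_negation_with_markers_py_spec : Claim_unchanged_near_negation_with_markers_py := by
  intro tokens tv w nm _ hD
  rw [pvD_iff] at hD
  by_cases hN : pvPNorm tokens tv w nm
  · rw [(pvA_iff_P tokens tv w nm).mpr (Or.inl hN), (pvB_iff tokens tv w nm).mpr hN]
  · have hW : ¬ pvPWrap tokens tv w nm := fun hw => hD ⟨hw, hN⟩
    have hA : near_negation_with_markers_py tokens tv w nm = false := by
      by_contra h
      simp only [Bool.not_eq_false] at h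
      rcases (pvA_iff_P tokens tv w nm).mp h with h' | h'
      · exact hN h'
      · exact hW h'
    have hB : near_negation_with_markers_py_alt tokens tv w nm = false := by
      by_contra h
      simp only [Bool.not_eq_false] at h
      exact hN ((pvB_iff tokens tv w nm).mp h)
    rw [hA, hB]

theorem near_negation_with_markers_py_changed : Claim_changed_near_negation_with_markers_py := by
  unfold Claim_changed_near_negation_with_markers_py; decide

theorem near_negation_with_markers_py_tight : Claim_exact_near_negation_with_markers_py := by
  intro tokens tv w nm _ hD
  obtain ⟨hW, hN⟩ := (pvD_iff tokens tv w nm).mp hD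
  rw [(pvA_iff_P tokens tv w nm).mpr (Or.inr hW)]
  intro h
  exact hN ((pvB_iff tokens tv w nm).mp h.symm)
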